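-- pv_equiv track=rewrite | github.com/SHN2004/hand-gesture-recognition-mediapipe | manage_two_hand_sequence_signs.py | _normalize_class_key
-- ===== SOURCE A (Python) =====
-- def _normalize_class_key(class_key: str) -> str:
--     normalized = class_key.strip().upper().replace(" ", "_").replace("-", "_")
--     allowed = "ABCDEFGHIJKLMNOPQRSTUVWXYZ0123456789_"
--     key = "".join(ch if ch in allowed else "_" for ch in normalized)
--     while "__" in key:
--         key = key.replace("__", "_")
--     key = key.strip("_")
--     if not key:
--         raise ValueError(f"Invalid class key: {class_key!r}")
--     return key
-- ===== SOURCE B (Python) =====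
-- def _normalize_class_key(class_key: str) -> str:
--     out = []
--     prev_sep = True  # suppresses leading '_' and collapses runs on the fly
--     for ch in class_key.strip().upper():
--         if 'A' <= ch <= 'Z' or '0' <= ch <= '9':
--             out.append(ch)
--             prev_sep = False
--         elif not prev_sep:
--             out.append('_')
--             prev_sep = True
--     key = ''.join(out).rstrip('_')
--     if not key:
--         raise ValueError(f"Invalid class key: {class_key!r}")
--     return key
-- ===== Notes on version B (the rewrite author's own statement) =====
-- stated objective: alternative
-- what changed: A classifies every character into a new string and then repeatedly rescans and rewrites the whole string (replacing double underscores until none remain) before a final strip of underscores; B is a single linear pass with a prev-was-separator flag that collapses separator runs and suppresses leading underscores on the fly, followed by one rstrip of underscores.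
import Mathlib
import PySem

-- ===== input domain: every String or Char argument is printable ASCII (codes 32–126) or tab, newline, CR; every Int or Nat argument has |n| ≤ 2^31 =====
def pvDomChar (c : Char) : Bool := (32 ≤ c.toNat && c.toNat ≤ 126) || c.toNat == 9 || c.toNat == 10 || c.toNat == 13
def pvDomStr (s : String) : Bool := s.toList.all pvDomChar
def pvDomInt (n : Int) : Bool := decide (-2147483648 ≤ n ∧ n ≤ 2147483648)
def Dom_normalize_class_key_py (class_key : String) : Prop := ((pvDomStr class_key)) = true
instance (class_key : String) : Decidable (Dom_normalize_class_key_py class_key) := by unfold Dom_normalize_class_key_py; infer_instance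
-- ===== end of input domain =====

-- B replaces A's classify-map plus repeated full-rescan collapse loop by a single pass with a
-- prev-separator flag; equal return value, same ValueError inputs (excluded by Pre_).

-- ===== PORT A =====
-- Python's collapse loop (replace double underscores until none remain); each iteration strictly shortens
-- the string, so `key.length` iterations always suffice — the fuel only makes the same loop total.
def pvAWhile : Nat → List Char → List Char
  | 0, key => key
  | fuel + 1, key =>
    if PySem.Chars.isIn ['_', '_'] key then
      pvAWhile fuel (PySem.Chars.replace key ['_', '_'] ['_'])
    else key

def normalize_class_key_py (class_key : String) : String :=
  let normalized := PySem.Str.replace (PySem.Str.replace (PySem.Str.upper (PySem.Str.strip class_key)) " " "_") "-" "_"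
  -- "".join(ch if ch in allowed else "_" for ch in normalized), char by char
  let key0 : List Char :=
    normalized.toList.map (fun ch => if "ABCDEFGHIJKLMNOPQRSTUVWXYZ0123456789_".toList.contains ch then ch else '_')
  let key1 : List Char := pvAWhile key0.length key0
  let key : List Char := PySem.Chars.stripChars key1 ['_']
  if key = [] then "" else String.ofList key   -- `if not key: raise ValueError(...)`: Pre_ excludes the raise; "" stands for the raise branch

-- ===== PORT B =====
-- exact port of str.rstrip("_")
def pvRstripU (l : List Char) : List Char := (l.reverse.dropWhile (fun c => c == '_')).reverse

def pvBLoop : List Char → Bool → List Char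
  | [], _ => []
  | c :: t, prevSep =>
    if ('A' ≤ c ∧ c ≤ 'Z') ∨ ('0' ≤ c ∧ c ≤ '9') then c :: pvBLoop t false
    else if prevSep then pvBLoop t true
    else '_' :: pvBLoop t true

def normalize_class_key_py_alt (class_key : String) : String :=
  let s := PySem.Str.upper (PySem.Str.strip class_key)
  let key := pvRstripU (pvBLoop s.toList true)
  if key = [] then "" else String.ofList key   -- `if not key: raise ValueError(...)`: Pre_ excludes the raise; "" stands for the raise branch

-- ===== PRECONDITION & SPEC =====
-- A raises ValueError exactly when the input has no ASCII letter or digit; Pre_ excludes those inputs (B raises there too).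
def Pre_normalize_class_key_py (class_key : String) : Prop :=
  (class_key.toList.any (fun c => c.isAlpha || c.isDigit)) = true
instance (class_key : String) : Decidable (Pre_normalize_class_key_py class_key) := by
  unfold Pre_normalize_class_key_py; infer_instance

def pvWitness_normalize_class_key_py : String := "two hand-Sign 3"

def Spec_normalize_class_key_py (class_key : String) (out : String) : Prop :=
  out = normalize_class_key_py_alt class_key
instance (class_key : String) (out : String) : Decidable (Spec_normalize_class_key_py class_key out) := by
  unfold Spec_normalize_class_key_py; infer_instance

-- ===== CLAIM (what is proved, stated in full; the proofs are below) =====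
def Claim_equal_normalize_class_key_py : Prop :=
  ∀ (class_key : String), Dom_normalize_class_key_py class_key →
    Pre_normalize_class_key_py class_key →
    Spec_normalize_class_key_py class_key (normalize_class_key_py class_key)

-- ===== LEMMAS AND PROOFS =====

-- the classifier of A's comprehension, and B's letter/digit test
def pvClassify (ch : Char) : Char :=
  if "ABCDEFGHIJKLMNOPQRSTUVWXYZ0123456789_".toList.contains ch then ch else '_'

-- clean form of key.replace("__", "_")
def pvRep : List Char → List Char
  | '_' :: '_' :: t => '_' :: pvRep t
  | c :: t => c :: pvRep t
  | [] => []

-- canonical result of the collapse loop: runs of '_' squeezed to one '_'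
def pvSqueeze : List Char → List Char
  | [] => []
  | [c] => [c]
  | a :: b :: t => if a = '_' ∧ b = '_' then pvSqueeze (b :: t) else a :: pvSqueeze (b :: t)
  termination_by l => l.length

-- B's loop seen on the classified characters: only "is it '_'" matters
def pvLS : List Char → Bool → List Char
  | [], _ => []
  | c :: t, f =>
    if c = '_' then (if f then pvLS t true else '_' :: pvLS t true) else c :: pvLS t false

theorem pvRep_single (c : Char) : pvRep [c] = [c] := by
  rw [pvRep.eq_def]; split
  · simp_all
  · rename_i heq; injection heq with h1 h2; subst h1; subst h2; simp [pvRep]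
  · simp_all

theorem pvRep_cons2 (c b : Char) (t : List Char) (h : ¬(c = '_' ∧ b = '_')) :
    pvRep (c :: b :: t) = c :: pvRep (b :: t) := by
  rw [pvRep.eq_def]; split
  · rename_i heq; injection heq with h1 h2; injection h2 with h3 h4
    exact absurd ⟨h1, h3⟩ h
  · rename_i heq; injection heq with h1 h2; subst h1; subst h2; rfl
  · simp_all

theorem pvRep_cons (c : Char) (t : List Char) (h : ¬(c = '_' ∧ ∃ t', t = '_' :: t')) :
    pvRep (c :: t) = c :: pvRep t := by
  cases t with
  | nil => exact pvRep_single c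
  | cons b t' =>
    refine pvRep_cons2 c b t' ?_
    rintro ⟨rfl, rfl⟩
    exact h ⟨rfl, t', rfl⟩

theorem pv_go_spec1 (a b : Char) (fuel : Nat) :
    ∀ (l acc : List Char), l.length ≤ fuel →
      PySem.Chars.replace.go [a] [b] fuel l acc
        = acc.reverse ++ l.map (fun c => if c = a then b else c) := by
  induction fuel with
  | zero =>
    intro l acc h
    have : l = [] := by cases l <;> simp_all
    subst this; simp [PySem.Chars.replace.go]
  | succ n ih =>
    intro l acc h
    match l with
    | [] => simp [PySem.Chars.replace.go]
    | c :: t =>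
      rw [PySem.Chars.replace.go]
      by_cases hp : c = a
      · subst hp
        have hpre : List.isPrefixOf [c] (c :: t) = true := by simp [List.isPrefixOf]
        simp only [hpre, if_true, List.length_cons, List.length_nil, List.drop_succ_cons, List.drop_zero]
        rw [ih t _ (by simpa using h)]
        simp
      · have hpre : List.isPrefixOf [a] (c :: t) = false := by
          simp [List.isPrefixOf]; exact fun hh => (hp hh.symm).elim
        simp only [hpre, Bool.false_eq_true, if_false]
        rw [ih t _ (by simpa using h)]
        simp [hp]

theorem pv_go_spec2 (fuel : Nat) :
    ∀ (l acc : List Char), l.length ≤ fuel →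
      PySem.Chars.replace.go ['_', '_'] ['_'] fuel l acc = acc.reverse ++ pvRep l := by
  induction fuel with
  | zero =>
    intro l acc h
    have : l = [] := by cases l <;> simp_all
    subst this; simp [PySem.Chars.replace.go, pvRep]
  | succ n ih =>
    intro l acc h
    match l with
    | [] => simp [PySem.Chars.replace.go, pvRep]
    | c :: t =>
      rw [PySem.Chars.replace.go]
      by_cases hp : List.isPrefixOf ['_', '_'] (c :: t) = true
      · obtain ⟨hc, t', rfl⟩ : c = '_' ∧ ∃ t', t = '_' :: t' := by
          cases t with
          | nil => simp [List.isPrefixOf] at hp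
          | cons b t' =>
            simp [List.isPrefixOf] at hp
            exact ⟨hp.1.symm, t', by rw [← hp.2]⟩
        subst hc
        simp only [hp, if_true, List.length_cons, List.length_nil, List.drop_succ_cons, List.drop_zero]
        rw [ih t' _ (by simp at h ⊢; omega)]
        simp [pvRep]
      · simp only [Bool.not_eq_true] at hp
        simp only [hp, Bool.false_eq_true, if_false]
        rw [ih t _ (by simpa using h)]
        rw [pvRep_cons c t ?_]
        · simp
        · rintro ⟨rfl, t', rfl⟩
          simp [List.isPrefixOf] at hp

theorem pv_replace_single (l : List Char) (a b : Char) :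
    PySem.Chars.replace l [a] [b] = l.map (fun c => if c = a then b else c) := by
  rw [PySem.Chars.replace]
  simp [pv_go_spec1 a b l.length l [] le_rfl]

theorem pv_replace_uu (l : List Char) :
    PySem.Chars.replace l ['_', '_'] ['_'] = pvRep l := by
  rw [PySem.Chars.replace]
  simp [pv_go_spec2 l.length l [] le_rfl]


theorem pvSqueeze_head? (l : List Char) : (pvSqueeze l).head? = l.head? := by
  fun_induction pvSqueeze l with
  | case1 => rfl
  | case2 c => rfl
  | case3 a b t h ih => rw [ih]; simp [h.1, h.2]
  | case4 a b t h ih => rfl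

theorem pvSqueeze_cons (c : Char) (x : List Char) :
    pvSqueeze (c :: x)
      = if c = '_' ∧ (pvSqueeze x).head? = some '_' then pvSqueeze x else c :: pvSqueeze x := by
  cases x with
  | nil => simp [pvSqueeze]
  | cons b t =>
    rw [pvSqueeze, pvSqueeze_head?]
    by_cases hc : c = '_' <;> by_cases hb : b = '_' <;> simp [hc, hb]

theorem pvSqueeze_rep (l : List Char) : pvSqueeze (pvRep l) = pvSqueeze l := by
  fun_induction pvRep l with
  | case1 t ih =>
    rw [pvSqueeze_cons '_' (pvRep t), ih, ← pvSqueeze_cons '_' t]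
    exact (by rw [pvSqueeze_cons '_' ('_' :: t), pvSqueeze_head?]; simp :
      pvSqueeze ('_' :: '_' :: t) = pvSqueeze ('_' :: t)).symm
  | case2 c t h ih =>
    rw [pvSqueeze_cons c (pvRep t), ih, ← pvSqueeze_cons c t]
  | case3 => rfl

theorem pvSqueeze_fixed (l : List Char) (h : ¬ (['_', '_'] <:+: l)) : pvSqueeze l = l := by
  fun_induction pvSqueeze l with
  | case1 => rfl
  | case2 c => rfl
  | case3 a b t hab ih =>
    exact absurd (List.IsPrefix.isInfix ⟨t, by simp [hab.1, hab.2]⟩) h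
  | case4 a b t hab ih =>
    rw [ih (fun hin => h (List.infix_cons hin))]

theorem pvRep_length_le (l : List Char) : (pvRep l).length ≤ l.length := by
  fun_induction pvRep l with
  | case1 t ih => simp; omega
  | case2 c t h ih => simpa using ih
  | case3 => simp

theorem pvRep_length_lt (l : List Char) (h : ['_', '_'] <:+: l) :
    (pvRep l).length < l.length := by
  fun_induction pvRep l with
  | case1 t ih =>
    have := pvRep_length_le t
    simp; omega
  | case2 c t hg ih =>
    rcases List.infix_cons_iff.mp h with hp | hi
    · obtain ⟨rest, hr⟩ := hp
      simp only [List.cons_append, List.nil_append, List.cons.injEq] at hr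
      exact absurd hr.2 (fun ht => hg rest hr.1.symm ht.symm)
    · simpa using ih hi
  | case3 => simp at h

theorem pvAWhile_eq (fuel : Nat) : ∀ l : List Char, l.length ≤ fuel →
    pvAWhile fuel l = pvSqueeze l := by
  induction fuel with
  | zero =>
    intro l h
    have : l = [] := by cases l <;> simp_all
    subst this; simp [pvAWhile, pvSqueeze]
  | succ n ih =>
    intro l h
    rw [pvAWhile]
    by_cases hin : PySem.Chars.isIn ['_', '_'] l = true
    · have hinf : ['_', '_'] <:+: l := (PySem.Chars.isIn_iff_infix ['_','_'] l).mp hin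
      rw [hin]; simp only [if_true]
      rw [pv_replace_uu]
      rw [ih (pvRep l) (by have h2 := pvRep_length_lt l hinf; omega)]
      exact pvSqueeze_rep l
    · simp only [Bool.not_eq_true] at hin
      rw [hin]
      simp only [Bool.false_eq_true, if_false]
      exact (pvSqueeze_fixed l ((PySem.Chars.isIn_eq_false_iff ['_','_'] l).mp hin)).symm

theorem pvLS_cons_ne (c : Char) (t : List Char) (f : Bool) (h : ¬ c = '_') :
    pvLS (c :: t) f = c :: pvLS t false := by
  simp [pvLS, h]

theorem pvSqueeze_eq_pvLS_false (l : List Char) : pvSqueeze l = pvLS l false := by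
  fun_induction pvSqueeze l with
  | case1 => rfl
  | case2 c => by_cases hc : c = '_' <;> simp [pvLS, hc]
  | case3 a b t hab ih =>
    rw [ih]
    rw [hab.1, hab.2]
    simp [pvLS]
  | case4 a b t hab ih =>
    by_cases ha : a = '_'
    · have hb : ¬ b = '_' := fun hb => hab ⟨ha, hb⟩
      subst ha
      rw [ih]
      simp [pvLS, hb]
    · rw [ih]
      simp [pvLS, ha]

theorem pvLS_true_eq (l : List Char) :
    pvLS l true = pvLS (l.dropWhile (fun c => c == '_')) false := by
  induction l with
  | nil => rfl
  | cons c t ih =>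
    by_cases hc : c = '_'
    · subst hc; simpa [pvLS] using ih
    · simp [pvLS, hc]

theorem pvDropWhile_squeeze (l : List Char) :
    (pvSqueeze l).dropWhile (fun c => c == '_')
      = pvSqueeze (l.dropWhile (fun c => c == '_')) := by
  fun_induction pvSqueeze l with
  | case1 => simp [pvSqueeze]
  | case2 c =>
    by_cases hc : c = '_'
    · simp [pvSqueeze, hc, List.dropWhile]
    · have hb : (c == '_') = false := by simp [hc]
      simp [pvSqueeze, List.dropWhile, hb]
  | case3 a b t hab ih =>
    rw [ih, hab.1, hab.2]
    try simp [List.dropWhile]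
  | case4 a b t hab ih =>
    by_cases ha : a = '_'
    · have hb : ¬ b = '_' := fun hb => hab ⟨ha, hb⟩
      subst ha
      rw [List.dropWhile_cons_of_pos (by simp), List.dropWhile_cons_of_pos (by simp)]
      rw [← ih]
    · rw [List.dropWhile_cons_of_neg (by simp [ha]), List.dropWhile_cons_of_neg (by simp [ha])]
      rw [pvSqueeze_cons a (b :: t), pvSqueeze_head?]
      simp [ha]

-- B's letter/digit test sees exactly the characters A keeps unchanged
theorem pvClassify_of_alnum (c : Char)
    (h : ('A' ≤ c ∧ c ≤ 'Z') ∨ ('0' ≤ c ∧ c ≤ '9')) : pvClassify c = c ∧ ¬ c = '_' := by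
  have hb : (65 ≤ c.toNat ∧ c.toNat ≤ 90) ∨ (48 ≤ c.toNat ∧ c.toNat ≤ 57) := h
  rw [← Char.ofNat_toNat c]
  set n := c.toNat with hn
  clear_value n
  rcases hb with ⟨h1, h2⟩ | ⟨h1, h2⟩ <;> interval_cases n <;> exact ⟨by decide, by decide⟩

theorem pvClassify_of_not_alnum (c : Char)
    (h : ¬ (('A' ≤ c ∧ c ≤ 'Z') ∨ ('0' ≤ c ∧ c ≤ '9'))) : pvClassify c = '_' := by
  unfold pvClassify
  by_cases hc : "ABCDEFGHIJKLMNOPQRSTUVWXYZ0123456789_".toList.contains c = true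
  · rw [if_pos hc]
    have hm : c ∈ "ABCDEFGHIJKLMNOPQRSTUVWXYZ0123456789_".toList := by
      simpa using hc
    have hl : "ABCDEFGHIJKLMNOPQRSTUVWXYZ0123456789_".toList
        = ['A','B','C','D','E','F','G','H','I','J','K','L','M','N','O','P','Q','R','S','T','U','V','W','X','Y','Z','0','1','2','3','4','5','6','7','8','9','_'] := by decide
    rw [hl] at hm
    fin_cases hm <;> first | rfl | exact absurd (by decide) h
  · rw [if_neg hc]

theorem pvBLoop_eq (l : List Char) : ∀ f : Bool, pvBLoop l f = pvLS (l.map pvClassify) f := by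
  induction l with
  | nil => intro f; rfl
  | cons c t ih =>
    intro f
    by_cases h : ('A' ≤ c ∧ c ≤ 'Z') ∨ ('0' ≤ c ∧ c ≤ '9')
    · obtain ⟨h1, h2⟩ := pvClassify_of_alnum c h
      simp only [pvBLoop, if_pos h, List.map_cons, h1]
      rw [pvLS_cons_ne c _ f h2, ih false]
    · have h1 := pvClassify_of_not_alnum c h
      simp only [pvBLoop, if_neg h, List.map_cons, h1]
      cases f <;> simp [pvLS, ih true]

theorem pvContains_underscore (c : Char) : (List.contains ['_'] c) = (c == '_') := by
  cases h : c == '_' <;> simp_all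

theorem pvStripChars_eq (k : List Char) :
    PySem.Chars.stripChars k ['_'] = pvRstripU (k.dropWhile (fun c => c == '_')) := by
  rw [PySem.Chars.stripChars, pvRstripU]
  have hp : (fun c => List.contains ['_'] c) = (fun c => c == '_') :=
    funext fun c => pvContains_underscore c
  rw [hp]

theorem pvClassify_absorb (a : Char) (l : List Char) (ha : a = ' ' ∨ a = '-') :
    (l.map (fun c => if c = a then '_' else c)).map pvClassify = l.map pvClassify := by
  rw [List.map_map]
  have : pvClassify ∘ (fun c => if c = a then '_' else c) = pvClassify := by
    funext c
    by_cases hc : c = a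
    · subst hc; rcases ha with rfl | rfl <;> simp <;> decide
    · simp [hc]
  rw [this]

-- both key lists coincide
theorem pvKeys_eq (ul : List Char) :
    PySem.Chars.stripChars (pvAWhile (ul.map pvClassify).length (ul.map pvClassify)) ['_']
      = pvRstripU (pvBLoop ul true) := by
  rw [pvAWhile_eq _ _ le_rfl, pvStripChars_eq, pvDropWhile_squeeze,
    pvSqueeze_eq_pvLS_false, ← pvLS_true_eq, pvBLoop_eq]

-- ===== VERDICT (by name: the statement is the Claim_ definition above) =====
theorem normalize_class_key_py_spec : Claim_equal_normalize_class_key_py := by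
  intro ck hdom hpre
  unfold Spec_normalize_class_key_py
  show normalize_class_key_py ck = normalize_class_key_py_alt ck
  unfold normalize_class_key_py normalize_class_key_py_alt
  have hsp : (" " : String).toList = [' '] := by decide
  have hmi : ("-" : String).toList = ['-'] := by decide
  have hun : ("_" : String).toList = ['_'] := by decide
  simp only [PySem.Str.toList_replace, hsp, hmi, hun]
  have hfold : (fun ch => if "ABCDEFGHIJKLMNOPQRSTUVWXYZ0123456789_".toList.contains ch then ch else '_')
      = pvClassify := rfl
  rw [hfold]
  rw [pv_replace_single, pv_replace_single]
  rw [pvClassify_absorb '-' _ (Or.inr rfl), pvClassify_absorb ' ' _ (Or.inl rfl)]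
  rw [pvKeys_eq]
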